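-- pv_equiv track=rewrite | github.com/katalystinteractive/agentic-trading | tools/news_sweep_collector.py | count_pending_orders
-- ===== SOURCE A (Python) =====
-- def count_pending_orders(ticker_orders):
--     """Count BUY vs SELL orders in a per-ticker order list.
--     Returns (buy_count, sell_count)."""
--     buy_count = 0
--     sell_count = 0
--     for order in ticker_orders:
--         order_type = order.get("type", "").upper()
--         if order_type == "BUY":
--             buy_count += 1
--         elif order_type == "SELL":
--             sell_count += 1
--     return buy_count, sell_count
-- ===== SOURCE B (Python) =====
-- def count_pending_orders(ticker_orders):
--     """Count BUY vs SELL orders in a per-ticker order list.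
--     Returns (buy_count, sell_count)."""
--     types = [order.get("type", "").upper() for order in ticker_orders]
--     return types.count("BUY"), types.count("SELL")
-- ===== Notes on version B (the rewrite author's own statement) =====
-- stated objective: idiomatic
-- what changed: Replaces the branched two-accumulator loop with a single comprehension producing the normalized type list, then two list.count queries; the if/elif control flow disappears.
import Mathlib
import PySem

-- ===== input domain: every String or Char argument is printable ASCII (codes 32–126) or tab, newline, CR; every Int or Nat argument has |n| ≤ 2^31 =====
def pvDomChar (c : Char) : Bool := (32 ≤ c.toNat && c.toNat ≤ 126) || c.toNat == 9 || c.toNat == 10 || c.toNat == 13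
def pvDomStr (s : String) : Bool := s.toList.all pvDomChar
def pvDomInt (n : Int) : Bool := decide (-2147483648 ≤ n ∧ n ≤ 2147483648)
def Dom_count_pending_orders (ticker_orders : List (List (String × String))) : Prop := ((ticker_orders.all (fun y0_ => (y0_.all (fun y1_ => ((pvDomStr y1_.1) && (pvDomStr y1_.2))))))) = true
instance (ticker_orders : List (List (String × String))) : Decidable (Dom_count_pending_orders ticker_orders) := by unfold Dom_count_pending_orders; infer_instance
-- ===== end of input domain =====

-- B replaces A's branched two-accumulator loop by one normalized-type list plus two count queries (idiomatic; same cost).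
-- order.get("type", "").upper() on an association-list dict (first-match lookup), shared by both ports
def pvOrderType (order : List (String × String)) : String :=
  PySem.Str.upper (((order.find? (fun p => p.1 == "type")).map (·.2)).getD "")

-- ===== PORT A =====
def count_pending_orders (ticker_orders : List (List (String × String))) : Int × Int :=
  ticker_orders.foldl
    (fun (acc : Int × Int) order =>
      if pvOrderType order = "BUY" then (acc.1 + 1, acc.2)
      else if pvOrderType order = "SELL" then (acc.1, acc.2 + 1)
      else acc)
    (0, 0)

-- ===== PORT B =====
def count_pending_orders_alt (ticker_orders : List (List (String × String))) : Int × Int :=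
  let types := ticker_orders.map (fun order => pvOrderType order)
  ((types.count "BUY" : Int), (types.count "SELL" : Int))

-- ===== PRECONDITION & SPEC =====
def Spec_count_pending_orders (ticker_orders : List (List (String × String))) (out : Int × Int) : Prop := out = count_pending_orders_alt ticker_orders
instance (ticker_orders : List (List (String × String))) (out : Int × Int) : Decidable (Spec_count_pending_orders ticker_orders out) := by unfold Spec_count_pending_orders; infer_instance

-- ===== CLAIM (what is proved, stated in full; the proofs are below) =====
def Claim_equal_count_pending_orders : Prop := ∀ (ticker_orders : List (List (String × String))), Dom_count_pending_orders ticker_orders → Spec_count_pending_orders ticker_orders (count_pending_orders ticker_orders)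

-- ===== LEMMAS AND PROOFS =====

-- A's foldl, started from any accumulator, adds the two counts of B's normalized-type list.
theorem count_pending_orders_foldl (tos : List (List (String × String))) (b s : Int) :
    tos.foldl
      (fun (acc : Int × Int) order =>
        if pvOrderType order = "BUY" then (acc.1 + 1, acc.2)
        else if pvOrderType order = "SELL" then (acc.1, acc.2 + 1)
        else acc)
      (b, s)
    = (b + ((tos.map (fun order => pvOrderType order)).count "BUY" : Int),
       s + ((tos.map (fun order => pvOrderType order)).count "SELL" : Int)) := by
  induction tos generalizing b s with
  | nil => simp
  | cons o rest ih =>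
    simp only [List.foldl_cons, List.map_cons]
    by_cases hb : pvOrderType o = "BUY"
    · have cb : (pvOrderType o :: rest.map (fun order => pvOrderType order)).count "BUY"
          = (rest.map (fun order => pvOrderType order)).count "BUY" + 1 := by
        simp [List.count_cons, hb]
      have cs : (pvOrderType o :: rest.map (fun order => pvOrderType order)).count "SELL"
          = (rest.map (fun order => pvOrderType order)).count "SELL" := by
        rw [hb]
        simp [List.count_cons]
      rw [if_pos hb, ih, cb, cs]
      simp only [Prod.mk.injEq]
      constructor <;> push_cast <;> ring
    · by_cases hs : pvOrderType o = "SELL"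
      · have cb : (pvOrderType o :: rest.map (fun order => pvOrderType order)).count "BUY"
            = (rest.map (fun order => pvOrderType order)).count "BUY" := by
          simp [List.count_cons]
          exact hb
        have cs : (pvOrderType o :: rest.map (fun order => pvOrderType order)).count "SELL"
            = (rest.map (fun order => pvOrderType order)).count "SELL" + 1 := by
          simp [List.count_cons, hs]
        rw [if_neg hb, if_pos hs, ih, cb, cs]
        simp only [Prod.mk.injEq]
        constructor <;> push_cast <;> ring
      · have cb : (pvOrderType o :: rest.map (fun order => pvOrderType order)).count "BUY"
            = (rest.map (fun order => pvOrderType order)).count "BUY" := by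
          simp [List.count_cons]
          exact hb
        have cs : (pvOrderType o :: rest.map (fun order => pvOrderType order)).count "SELL"
            = (rest.map (fun order => pvOrderType order)).count "SELL" := by
          simp [List.count_cons]
          exact hs
        rw [if_neg hb, if_neg hs, ih, cb, cs]

-- ===== VERDICT (by name: the statement is the Claim_ definition above) =====
theorem count_pending_orders_spec : Claim_equal_count_pending_orders := by
  intro tos _
  show count_pending_orders tos = count_pending_orders_alt tos
  simp only [count_pending_orders, count_pending_orders_alt]
  rw [count_pending_orders_foldl]
  simp
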